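-- pv_equiv track=rewrite | github.com/ABCTreebank/abctk.obj | abctk/obj/ABCCat.py | unify_feats
-- ===== SOURCE A (Python) =====
-- from typing import FrozenSet, Generic, Dict, Optional, Tuple, Union, Iterator, Deque, Set, Sequence, Any, Callable, TypeVar
--
-- def unify_feats(
--     feat_1: FrozenSet[Tuple[str, str]],
--     feat_2: FrozenSet[Tuple[str, str]],
-- ):
--     feat_union = feat_1.union(feat_2)
--     res_dict = {}
--     for feat, val in feat_union:
--         val_prev = res_dict.get(feat, None)
--         if val_prev is None:
--             res_dict[feat] = val
--         elif val == val_prev: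
--             pass
--         else:
--             return None
--
--     return frozenset(res_dict.items())
-- ===== SOURCE B (Python) =====
-- def unify_feats(feat_1, feat_2):
--     feat_union = feat_1 | feat_2
--     # identical (feat, val) pairs are merged by the set union, so the union is
--     # conflict-free exactly when no two of its entries share a feature name
--     if len({feat for feat, _ in feat_union}) == len(feat_union):
--         return frozenset(feat_union)
--     return None
-- ===== Notes on version B (the rewrite author's own statement) =====
-- stated objective: simpler
-- what changed: Replaces the accumulating-dict conflict-detection loop with a distinct-key cardinality check over the set union: since the union already merges identical pairs, any duplicate key in it is a conflict, so B just compares the number of distinct keys with the size of the union and returns the union itself when they agree.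
import Mathlib
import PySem

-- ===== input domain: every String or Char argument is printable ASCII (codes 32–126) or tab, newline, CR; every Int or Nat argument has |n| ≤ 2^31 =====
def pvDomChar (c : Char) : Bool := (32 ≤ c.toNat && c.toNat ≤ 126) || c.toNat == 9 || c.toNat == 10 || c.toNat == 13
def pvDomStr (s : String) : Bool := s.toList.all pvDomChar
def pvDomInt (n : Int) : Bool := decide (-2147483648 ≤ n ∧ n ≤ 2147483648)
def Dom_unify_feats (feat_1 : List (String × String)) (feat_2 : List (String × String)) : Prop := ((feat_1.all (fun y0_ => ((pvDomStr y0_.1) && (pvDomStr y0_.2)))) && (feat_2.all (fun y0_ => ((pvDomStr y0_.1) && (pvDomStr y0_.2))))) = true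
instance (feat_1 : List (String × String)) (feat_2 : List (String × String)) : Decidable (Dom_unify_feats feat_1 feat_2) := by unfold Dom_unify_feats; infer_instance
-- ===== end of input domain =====

-- ===== PORT A =====
-- B simplifies A's accumulating-dict conflict loop to a distinct-key cardinality check on the union; equal output on all inputs.

-- A's for-loop over the union: build res_dict, bail out with None on a conflicting value.
def unifyLoop : List (String × String) → PySem.Dict String String → Option (PySem.Dict String String)
  | [], d => some d
  | (feat, val) :: rest, d =>
    match d.get? feat with
    | none => unifyLoop rest (d.insert feat val)
    | some val_prev => if val == val_prev then unifyLoop rest d else none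

def unify_feats (feat_1 : List (String × String)) (feat_2 : List (String × String)) : Option (List (String × String)) :=
  let feat_union := PySem.Set.union (PySem.Set.ofList feat_1) (PySem.Set.ofList feat_2)
  (unifyLoop feat_union PySem.Dict.empty).map PySem.Dict.items

-- ===== PORT B =====
def unify_feats_alt (feat_1 : List (String × String)) (feat_2 : List (String × String)) : Option (List (String × String)) :=
  let feat_union := PySem.Set.union (PySem.Set.ofList feat_1) (PySem.Set.ofList feat_2)
  if PySem.Set.len (PySem.Set.ofList (feat_union.map Prod.fst)) == PySem.Set.len feat_union then
    some feat_union  -- frozenset(feat_union): feat_union is already a set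
  else
    none

-- ===== PRECONDITION & SPEC =====
def Spec_unify_feats (feat_1 : List (String × String)) (feat_2 : List (String × String)) (out : Option (List (String × String))) : Prop := out = unify_feats_alt feat_1 feat_2
instance (feat_1 : List (String × String)) (feat_2 : List (String × String)) (out : Option (List (String × String))) : Decidable (Spec_unify_feats feat_1 feat_2 out) := by unfold Spec_unify_feats; infer_instance

-- ===== CLAIM (what is proved, stated in full; the proofs are below) =====
def Claim_equal_unify_feats : Prop := ∀ (feat_1 : List (String × String)) (feat_2 : List (String × String)), Dom_unify_feats feat_1 feat_2 → Spec_unify_feats feat_1 feat_2 (unify_feats feat_1 feat_2)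

-- ===== LEMMAS AND PROOFS =====

lemma foldl_add_sublist {α : Type} [BEq α] (l : List α) (s : List α) :
    (l.foldl PySem.Set.add s).Sublist (s ++ l) := by
  induction l generalizing s with
  | nil => simp
  | cons x xs ih =>
    have h1 : (PySem.Set.add s x).Sublist (s ++ [x]) := by
      unfold PySem.Set.add
      split
      · exact List.sublist_append_left s [x]
      · exact List.Sublist.refl _
    have h3 : ((PySem.Set.add s x) ++ xs).Sublist (s ++ x :: xs) := by
      simpa using h1.append_right xs
    simpa using (ih (PySem.Set.add s x)).trans h3

lemma ofList_sublist {α : Type} [BEq α] (l : List α) : (PySem.Set.ofList l).Sublist l := by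
  simpa using foldl_add_sublist l []

lemma length_ofList_iff_nodup {α : Type} [BEq α] [LawfulBEq α] (l : List α) :
    (PySem.Set.ofList l).length = l.length ↔ l.Nodup := by
  constructor
  · intro h
    have heq := (ofList_sublist l).eq_of_length h
    rw [← heq]
    exact PySem.Set.nodup_ofList l
  · intro h
    rw [PySem.Set.ofList_eq_self_of_nodup l h]

-- The loop invariant: over pairwise-distinct remaining pairs, the loop succeeds iff no key
-- repeats (across the dict and the rest of the list), and then it simply appends the pairs.
lemma unifyLoop_spec (u : List (String × String)) : ∀ (d : PySem.Dict String String),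
    d.keys.Nodup → (d.items ++ u).Nodup →
    unifyLoop u d =
      if (d.keys ++ u.map Prod.fst).Nodup then some (PySem.Dict.mk (d.items ++ u)) else none := by
  induction u with
  | nil =>
    intro d hk _
    simp [unifyLoop, hk]
  | cons p rest ih =>
    intro d hk hi
    obtain ⟨feat, val⟩ := p
    rw [unifyLoop]
    cases hget : d.get? feat with
    | none =>
      have hmem : feat ∉ d.keys := (PySem.Dict.get?_eq_none_iff_not_mem_keys d feat).mp hget
      have hcon : d.contains feat = false := by
        by_contra hc
        exact hmem ((PySem.Dict.contains_iff_mem_keys d feat).mp (by simpa using hc))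
      have hkeys' : (d.insert feat val).keys = d.keys ++ [feat] :=
        PySem.Dict.keys_insert_of_not_contains d val hcon
      have hitems' : (d.insert feat val).items = d.items ++ [(feat, val)] :=
        PySem.Dict.items_insert_of_not_contains d val hcon
      have hk' : (d.insert feat val).keys.Nodup := by
        rw [hkeys']
        exact hk.append (List.nodup_singleton feat)
          (fun a ha hb => hmem ((List.mem_singleton.mp hb) ▸ ha))
      have hi' : ((d.insert feat val).items ++ rest).Nodup := by
        rw [hitems']
        simpa using hi
      rw [ih _ hk' hi', hkeys', hitems']
      simp [List.append_assoc]
    | some val_prev =>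
      have hpair : (feat, val_prev) ∈ d.items := PySem.Dict.mem_items_of_get?_eq_some d hget
      have hmem : feat ∈ d.keys := PySem.Dict.mem_keys_of_mem_items d hpair
      have hcond : ¬ (d.keys ++ feat :: List.map Prod.fst rest).Nodup := by
        intro hnd
        rw [List.nodup_append] at hnd
        exact hnd.2.2 feat hmem feat (by simp) rfl
      have hne : val ≠ val_prev := by
        intro heq
        subst heq
        rw [List.nodup_append] at hi
        exact hi.2.2 (feat, val) hpair (feat, val) (by simp) rfl
      simp only [List.map_cons]
      rw [if_neg hcond, if_neg (by simpa using hne)]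

lemma union_nodup (feat_1 feat_2 : List (String × String)) :
    (PySem.Set.union (PySem.Set.ofList feat_1) (PySem.Set.ofList feat_2)).Nodup :=
  PySem.Set.nodup_update _ _ (PySem.Set.nodup_ofList feat_1)

-- ===== VERDICT (by name: the statement is the Claim_ definition above) =====
theorem unify_feats_spec : Claim_equal_unify_feats := by
  intro feat_1 feat_2 _
  unfold Spec_unify_feats unify_feats unify_feats_alt
  dsimp only
  set u := PySem.Set.union (PySem.Set.ofList feat_1) (PySem.Set.ofList feat_2) with hu
  have hnd : u.Nodup := union_nodup feat_1 feat_2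
  have hempty : (PySem.Dict.empty : PySem.Dict String String).items = [] := rfl
  have hloop := unifyLoop_spec u PySem.Dict.empty
    (by rw [PySem.Dict.keys_empty]; exact List.nodup_nil)
    (by rw [hempty]; simpa using hnd)
  rw [PySem.Dict.keys_empty, hempty] at hloop
  simp only [List.nil_append] at hloop
  have hlen : ((PySem.Set.len (PySem.Set.ofList (u.map Prod.fst)) == PySem.Set.len u) = true)
      ↔ (u.map Prod.fst).Nodup := by
    rw [beq_iff_eq]
    unfold PySem.Set.len
    rw [Nat.cast_inj]
    rw [show u.length = (u.map Prod.fst).length by simp]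
    exact length_ofList_iff_nodup _
  by_cases hc : (u.map Prod.fst).Nodup
  · rw [hloop, if_pos hc, if_pos (hlen.mpr hc)]
    rfl
  · rw [hloop, if_neg hc, if_neg (fun h => hc (hlen.mp h))]
    rfl
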